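-- pv_equiv track=rewrite | github.com/Adarshb2000/coding | CF_702A.py | cf_702A
-- ===== SOURCE A (Python) =====
-- def cf_702A(numbers: list):
--     answer = 0
--     for i in range(len(numbers) - 1):
--         b, a = sorted([numbers[i], numbers[i + 1]])
--         while 2 * b < a:
--             b *= 2
--             answer += 1
--
--     return answer
-- ===== SOURCE B (Python) =====
-- def cf_702A(numbers: list):
--     # Closed-form doubling count per adjacent pair: smallest k with b*2^(k+1) >= a
--     # is bit_length(ceil(a/b) - 1) - 1.
--     answer = 0
--     for x, y in zip(numbers, numbers[1:]):
--         b, a = min(x, y), max(x, y)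
--         if b > 0 and 2 * b < a:
--             q = -(-a // b)  # ceil(a / b)
--             answer += (q - 1).bit_length() - 1
--     return answer
-- ===== Notes on version B (the rewrite author's own statement) =====
-- stated objective: alternative
-- what changed: The inner while-loop that repeatedly doubles the smaller element of each adjacent pair is replaced by a closed-form per-pair count computed with ceiling division and bit_length (intended as O(n) vs O(n log M); a timing run could not measure a ratio because A does not finish on its random inputs).
import Mathlib
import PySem

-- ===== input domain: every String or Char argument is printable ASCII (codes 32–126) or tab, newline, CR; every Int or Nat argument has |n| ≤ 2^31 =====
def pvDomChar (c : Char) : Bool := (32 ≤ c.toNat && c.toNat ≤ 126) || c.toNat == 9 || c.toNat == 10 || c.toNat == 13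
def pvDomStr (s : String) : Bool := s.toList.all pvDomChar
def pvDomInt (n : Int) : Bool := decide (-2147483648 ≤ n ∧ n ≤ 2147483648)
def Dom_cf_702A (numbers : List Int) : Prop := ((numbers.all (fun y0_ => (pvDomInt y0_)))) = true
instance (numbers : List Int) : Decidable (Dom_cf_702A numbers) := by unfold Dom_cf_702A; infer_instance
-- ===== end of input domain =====

-- B replaces A's inner doubling while-loop with a closed-form bit_length count per
-- adjacent pair (objective: alternative — one arithmetic step per pair instead of a loop).

-- ===== PORT A =====
-- A's inner 'while 2*b < a: b *= 2; answer += 1'.  The extra '0 < b' in the guard is a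
-- totality guard only: where it differs from Python (b ≤ 0 < a after sorting) the Python
-- loop never terminates, and those inputs are excluded by Pre_cf_702A.
def cf702A_loop (b a answer : Int) : Int :=
  if h : 2 * b < a ∧ 0 < b then cf702A_loop (2 * b) a (answer + 1) else answer
termination_by (a - 2 * b).toNat
decreasing_by omega

def cf_702A (numbers : List Int) : Int :=
  (PySem.List.pyRange 0 ((numbers.length : Int) - 1) 1).foldl (fun answer i =>
    match PySem.List.sorted [PySem.List.pyGetD numbers i 0, PySem.List.pyGetD numbers (i + 1) 0]
        (fun v => v) false with
    | [b, a] => cf702A_loop b a answer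
    | _ => answer) 0

-- ===== PORT B =====
def cf702A_pairCost (x y : Int) : Int :=
  let b := min x y
  let a := max x y
  if 0 < b ∧ 2 * b < a then
    let q := -(PySem.Int.floordiv (-a) b)   -- ceil(a / b)
    (PySem.Int.bitLength (q - 1) : Int) - 1
  else 0

def cf_702A_alt (numbers : List Int) : Int :=
  (numbers.zip numbers.tail).foldl (fun answer p => answer + cf702A_pairCost p.1 p.2) 0

-- ===== PRECONDITION & SPEC =====
-- Pre_ excludes lists with an adjacent pair whose smaller element is negative, or is zero
-- while the other is nonzero: on those A's while-loop never terminates (no value is returned).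
def Pre_cf_702A (numbers : List Int) : Prop :=
  List.IsChain (fun x y => (0 < x ∧ 0 < y) ∨ (x = 0 ∧ y = 0)) numbers
instance (numbers : List Int) : Decidable (Pre_cf_702A numbers) := by
  unfold Pre_cf_702A; infer_instance
def pvWitness_cf_702A : List Int := [1, 4, 16]

def Spec_cf_702A (numbers : List Int) (out : Int) : Prop := out = cf_702A_alt numbers
instance (numbers : List Int) (out : Int) : Decidable (Spec_cf_702A numbers out) := by unfold Spec_cf_702A; infer_instance

-- ===== CLAIM (what is proved, stated in full; the proofs are below) =====
def Claim_equal_cf_702A : Prop := ∀ (numbers : List Int), Dom_cf_702A numbers → Pre_cf_702A numbers → Spec_cf_702A numbers (cf_702A numbers)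

-- ===== LEMMAS AND PROOFS =====

-- sorted of a two-element list is [min, max]
lemma sorted_pair (x y : Int) :
    PySem.List.sorted [x, y] (fun v => v) false = [min x y, max x y] := by
  rcases le_total x y with h | h
  · rw [PySem.List.sorted_id_eq_of_perm_of_pairwise (ys := [x, y])]
    · simp [min_eq_left h, max_eq_right h]
    · exact List.Perm.refl _
    · simp [h]
  · rw [PySem.List.sorted_id_eq_of_perm_of_pairwise (ys := [y, x])]
    · simp [min_eq_right h, max_eq_left h]
    · exact List.Perm.swap _ _ _
    · simp [h]

-- ceiling-division bracket: q := -((-a) // b) satisfies (q-1)*b < a ≤ q*b for 0 < b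
lemma ceil_bracket (a b : Int) (hb : 0 < b) :
    (-(PySem.Int.floordiv (-a) b) - 1) * b < a ∧ a ≤ -(PySem.Int.floordiv (-a) b) * b := by
  have h := (PySem.Int.neg_floordiv_neg_eq_iff_of_pos (a := a) (b := b)
      (q := -(PySem.Int.floordiv (-a) b)) hb).mp rfl
  exact ⟨h.1, h.2⟩

-- bitLength of 2m and 2m+1 (m >= 1) is bitLength m + 1
lemma bitLength_two_mul (m : Int) (hm : 0 < m) :
    PySem.Int.bitLength (2 * m) = PySem.Int.bitLength m + 1 ∧
    PySem.Int.bitLength (2 * m + 1) = PySem.Int.bitLength m + 1 := by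
  have h1 : PySem.Int.floordiv (2 * m) 2 = m := by
    rw [PySem.Int.floordiv_eq_ediv_of_pos (by omega)]; omega
  have h2 : PySem.Int.floordiv (2 * m + 1) 2 = m := by
    rw [PySem.Int.floordiv_eq_ediv_of_pos (by omega)]; omega
  constructor
  · rw [PySem.Int.bitLength_of_pos (by omega), h1]
  · rw [PySem.Int.bitLength_of_pos (by omega), h2]

-- the per-pair closed form seen from (b, a) = (min, max)
def pairBA (b a : Int) : Int :=
  if 0 < b ∧ 2 * b < a then
    (PySem.Int.bitLength (-(PySem.Int.floordiv (-a) b) - 1) : Int) - 1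
  else 0

lemma pairCost_eq (x y : Int) : cf702A_pairCost x y = pairBA (min x y) (max x y) := by
  simp [cf702A_pairCost, pairBA]

-- one doubling step of the closed form
lemma pairBA_step (b a : Int) (hb : 0 < b) (h : 2 * b < a) :
    pairBA b a = 1 + pairBA (2 * b) a := by
  have hq := ceil_bracket a b hb
  set q : Int := -(PySem.Int.floordiv (-a) b) with hqdef
  have hq3 : 3 ≤ q := by nlinarith [hq.1, hq.2]
  rw [pairBA, if_pos ⟨hb, h⟩]
  by_cases hc : 2 * (2 * b) < a
  · have hq' := ceil_bracket a (2 * b) (by omega)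
    set q' : Int := -(PySem.Int.floordiv (-a) (2 * b)) with hq'def
    have hq'3 : 3 ≤ q' := by nlinarith [hq'.1, hq'.2]
    have hub : q ≤ 2 * q' := by nlinarith [hq.1, hq'.2]
    have hlb : 2 * q' - 1 ≤ q := by nlinarith [hq'.1, hq.2]
    rw [pairBA, if_pos ⟨by omega, hc⟩, ← hqdef, ← hq'def]
    have hbl := bitLength_two_mul (q' - 1) (by omega)
    have : q - 1 = 2 * (q' - 1) ∨ q - 1 = 2 * (q' - 1) + 1 := by omega
    rcases this with he | he <;> rw [he]
    · rw [hbl.1]; push_cast; ring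
    · rw [hbl.2]; push_cast; ring
  · rw [pairBA, if_neg (by omega), ← hqdef]
    have h4 : q ≤ 4 := by nlinarith [hq.1]
    have : q = 3 ∨ q = 4 := by omega
    rcases this with he | he <;> rw [he] <;> norm_num
    · have : PySem.Int.bitLength 2 = 2 := by decide
      rw [this]; ring
    · have : PySem.Int.bitLength 3 = 2 := by decide
      rw [this]; ring

-- the while-loop computes the closed form
lemma loop_eq (a : Int) : ∀ b ans : Int, 0 < b →
    cf702A_loop b a ans = ans + pairBA b a := by
  intro b ans
  refine cf702A_loop.induct a
    (fun b ans => 0 < b → cf702A_loop b a ans = ans + pairBA b a) ?_ ?_ b ans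
  · intro b ans h ih hb
    rw [cf702A_loop, dif_pos h, ih (by omega), pairBA_step b a hb h.1]
    ring
  · intro b ans h hb
    rw [cf702A_loop, dif_neg h, pairBA, if_neg (by tauto)]
    ring

-- index-based fold over adjacent positions = fold over zip with the tail
lemma foldl_adj (step : Int → Int → Int → Int) :
    ∀ (xs : List Int) (init : Int),
    (PySem.List.pyRange 0 ((xs.length : Int) - 1) 1).foldl
      (fun ans i => step ans (PySem.List.pyGetD xs i 0) (PySem.List.pyGetD xs (i + 1) 0)) init
    = (xs.zip xs.tail).foldl (fun ans p => step ans p.1 p.2) init := by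
  intro xs
  induction xs with
  | nil => intro init; rw [PySem.List.pyRange_one_eq_nil (by simp)]; simp
  | cons x ys ih =>
      intro init
      cases ys with
      | nil => rw [PySem.List.pyRange_one_eq_nil (by simp)]; simp
      | cons y zs =>
        have hlen : ((x :: y :: zs).length : Int) - 1 = ((y :: zs).length : Int) := by
          simp
        rw [hlen, PySem.List.pyRange_one_cons (Int.natCast_pos.mpr (List.length_pos_of_ne_nil (by simp)))]
        simp only [List.foldl_cons]
        have hx : PySem.List.pyGetD (x :: y :: zs) 0 0 = x := by
          simp [PySem.List.pyGetD_zero_cons]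
        have hy : PySem.List.pyGetD (x :: y :: zs) (0 + 1) 0 = y := by
          rw [show (0 + 1 : Int) = ((1 : Nat) : Int) from by norm_num,
            PySem.List.pyGetD_natCast]
          rfl
        rw [hx, hy]
        have hshift : ∀ init' : Int,
            (PySem.List.pyRange 1 ((y :: zs).length : Int) 1).foldl
              (fun ans i => step ans (PySem.List.pyGetD (x :: y :: zs) i 0)
                (PySem.List.pyGetD (x :: y :: zs) (i + 1) 0)) init'
          = (PySem.List.pyRange 0 (((y :: zs).length : Int) - 1) 1).foldl
              (fun ans i => step ans (PySem.List.pyGetD (y :: zs) i 0)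
                (PySem.List.pyGetD (y :: zs) (i + 1) 0)) init' := by
          intro init'
          rw [PySem.List.pyRange_one 1, PySem.List.pyRange_one 0]
          have hb : (((y :: zs).length : Int) - 1 - 0).toNat
              = (((y :: zs).length : Int) - 1).toNat := by omega
          rw [hb]
          rw [List.foldl_map, List.foldl_map]
          apply List.foldl_ext
          intro ans k _
          have e1 : (1 : Int) + (k : Int) = ((k + 1 : Nat) : Int) := by push_cast; ring
          have e2 : (1 : Int) + (k : Int) + 1 = ((k + 2 : Nat) : Int) := by push_cast; ring
          have e3 : (0 : Int) + (k : Int) = ((k : Nat) : Int) := by omega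
          have e4 : (0 : Int) + (k : Int) + 1 = ((k + 1 : Nat) : Int) := by push_cast; ring
          rw [e2, e1, e4, e3, PySem.List.pyGetD_natCast, PySem.List.pyGetD_natCast,
            PySem.List.pyGetD_natCast, PySem.List.pyGetD_natCast]
          simp
        have h01 : (0 : Int) + 1 = 1 := by norm_num
        rw [h01, hshift, ih]
        rfl

lemma chain'_zip (R : Int → Int → Prop) :
    ∀ xs : List Int, List.IsChain R xs → ∀ p ∈ xs.zip xs.tail, R p.1 p.2 := by
  intro xs
  induction xs with
  | nil => simp
  | cons x ys ih =>
      cases ys with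
      | nil => simp
      | cons y zs =>
        intro h p hp
        rcases List.mem_cons.mp hp with rfl | hp'
        · exact (List.isChain_cons_cons.mp h).1
        · exact ih (List.isChain_cons_cons.mp h).2 p hp'

-- fold over admissible pairs: A's loop step agrees with B's closed-form step
lemma zip_fold_eq :
    ∀ (ps : List (Int × Int)),
    (∀ p ∈ ps, (0 < p.1 ∧ 0 < p.2) ∨ (p.1 = 0 ∧ p.2 = 0)) → ∀ init : Int,
    ps.foldl (fun ans p =>
        match PySem.List.sorted [p.1, p.2] (fun v => v) false with
        | [b, a] => cf702A_loop b a ans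
        | _ => ans) init
    = ps.foldl (fun ans p => ans + cf702A_pairCost p.1 p.2) init := by
  intro ps
  induction ps with
  | nil => intro _ _; rfl
  | cons p ps ih =>
      intro hmem init
      simp only [List.foldl_cons]
      have hstep : (match PySem.List.sorted [p.1, p.2] (fun v => v) false with
          | [b, a] => cf702A_loop b a init
          | _ => init) = init + cf702A_pairCost p.1 p.2 := by
        rw [sorted_pair, pairCost_eq]
        rcases hmem p (List.mem_cons_self) with ⟨h1, h2⟩ | ⟨h1, h2⟩
        · exact loop_eq _ _ _ (by simp only [lt_min_iff]; omega)
        · rw [h1, h2]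
          simp only [min_self, max_self]
          rw [cf702A_loop]
          norm_num [pairBA]
      rw [hstep]
      exact ih (fun q hq => hmem q (List.mem_cons_of_mem _ hq)) _

-- ===== VERDICT (by name: the statement is the Claim_ definition above) =====
theorem cf_702A_spec : Claim_equal_cf_702A := by
  intro numbers _ hpre
  unfold Spec_cf_702A cf_702A cf_702A_alt
  rw [foldl_adj (fun ans u v =>
      match PySem.List.sorted [u, v] (fun w => w) false with
      | [b, a] => cf702A_loop b a ans
      | _ => ans) numbers 0]
  exact zip_fold_eq _ (chain'_zip _ _ hpre) 0
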